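-- pv_equiv track=rewrite | github.com/HugoCD20/Criptosistemas | criptosistemas/rompimientoVi.py | dividir
-- ===== SOURCE A (Python) =====
-- def dividir(entrada, mcd):
--     subcriptograma=[]
--     for i in range(mcd):
--         auxiliar=[]
--         for j in range(i,len(entrada),mcd):
--             auxiliar.append(entrada[j])
--         subcriptograma.append(auxiliar)
--     return subcriptograma
-- ===== SOURCE B (Python) =====
-- def dividir(entrada, mcd):
--     subcriptograma = [[] for _ in range(mcd)]
--     if mcd > 0:
--         for idx, val in enumerate(entrada):
--             subcriptograma[idx % mcd].append(val)
--     return subcriptograma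
-- ===== Notes on version B (the rewrite author's own statement) =====
-- stated objective: alternative
-- what changed: Replaces the nested per-bucket strided gather (for each i in range(mcd), scan indices i, i+mcd, ...) by a single enumerate pass that scatters each element into bucket idx % mcd of a pre-built bucket list, guarded by mcd > 0 so mcd <= 0 still yields [].
import Mathlib
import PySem

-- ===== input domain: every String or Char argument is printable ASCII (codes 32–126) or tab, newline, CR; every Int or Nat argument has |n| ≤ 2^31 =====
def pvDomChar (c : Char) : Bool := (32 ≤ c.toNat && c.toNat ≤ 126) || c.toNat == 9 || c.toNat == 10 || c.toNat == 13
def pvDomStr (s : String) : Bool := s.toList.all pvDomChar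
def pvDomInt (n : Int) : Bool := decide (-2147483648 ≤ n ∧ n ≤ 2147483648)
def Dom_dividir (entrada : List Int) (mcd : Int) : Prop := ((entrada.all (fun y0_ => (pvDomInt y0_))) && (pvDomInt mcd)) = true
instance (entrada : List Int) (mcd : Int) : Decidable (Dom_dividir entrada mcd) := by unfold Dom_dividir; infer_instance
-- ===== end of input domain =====

-- B replaces A's nested per-bucket strided gather by one enumerate pass scattering each
-- element into bucket idx % mcd (objective: alternative decomposition, same cost).

-- ===== PORT A =====
-- entrada[j] is ported with pyGetD: exact here, since j ranges over range(i, len(entrada), mcd)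
-- and is therefore always a valid nonnegative index.
def dividir (entrada : List Int) (mcd : Int) : List (List Int) :=
  (PySem.List.pyRange 0 mcd 1).foldl
    (fun subcriptograma i =>
      subcriptograma ++
        [(PySem.List.pyRange i (entrada.length : Int) mcd).foldl
          (fun auxiliar j => auxiliar ++ [PySem.List.pyGetD entrada j 0]) []])
    []

-- ===== PORT B =====
-- the scatter loop of Source B: for idx, val in enumerate(entrada): sub[idx % mcd].append(val).
-- The index idx % mcd is exact via .toNat/set/getD: with mcd > 0 it is nonnegative and < mcd.
def dividirScatter (mcd : Int) : List (Int × Int) → List (List Int) → List (List Int)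
  | [], subcriptograma => subcriptograma
  | (idx, val) :: rest, subcriptograma =>
      dividirScatter mcd rest
        (subcriptograma.set (PySem.Int.mod idx mcd).toNat
          (subcriptograma.getD (PySem.Int.mod idx mcd).toNat [] ++ [val]))

def dividir_alt (entrada : List Int) (mcd : Int) : List (List Int) :=
  let subcriptograma := List.replicate mcd.toNat ([] : List Int)
  if 0 < mcd then dividirScatter mcd (PySem.List.enumerate entrada 0) subcriptograma
  else subcriptograma

-- ===== PRECONDITION & SPEC =====
def Spec_dividir (entrada : List Int) (mcd : Int) (out : List (List Int)) : Prop := out = dividir_alt entrada mcd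
instance (entrada : List Int) (mcd : Int) (out : List (List Int)) : Decidable (Spec_dividir entrada mcd out) := by unfold Spec_dividir; infer_instance

-- ===== CLAIM (what is proved, stated in full; the proofs are below) =====
def Claim_equal_dividir : Prop := ∀ (entrada : List Int) (mcd : Int), Dom_dividir entrada mcd → Spec_dividir entrada mcd (dividir entrada mcd)

-- ===== LEMMAS AND PROOFS =====

-- Python's % for a positive divisor is Int.emod.
theorem pvMod_pos (a b : Int) (hb : 0 < b) : PySem.Int.mod a b = a % b := by
  simp [PySem.Int.mod, Int.fmod_eq_emod, Or.inl (le_of_lt hb)]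

theorem pvEmod_unique (b m r : Int) (_hm : 0 < m) (h0 : 0 ≤ r) (h1 : r < m)
    (hd : m ∣ b - r) : b % m = r := by
  have h2 : b % m = r % m :=
    (Int.emod_eq_emod_iff_emod_sub_eq_zero).mpr (Int.emod_eq_zero_of_dvd hd)
  rw [h2, Int.emod_eq_of_lt h0 h1]

theorem pvRange_pos_nil (a b s : Int) (hs : 0 < s) (hba : b ≤ a) :
    PySem.List.pyRange a b s = [] := by
  rw [PySem.List.pyRange_of_pos a b hs, if_neg (by omega)]
  simp

theorem pvRange_pos_cons (a b s : Int) (hs : 0 < s) (hab : a < b) :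
    PySem.List.pyRange a b s = a :: PySem.List.pyRange (a + s) b s := by
  rw [PySem.List.pyRange_of_pos a b hs, PySem.List.pyRange_of_pos (a + s) b hs]
  have key : b - a + s - 1 = (b - (a + s) + s - 1) + 1 * s := by ring
  have h1 : (b - a + s - 1) / s = (b - (a + s) + s - 1) / s + 1 := by
    rw [key, Int.add_mul_ediv_right _ _ (by omega : s ≠ 0)]
  by_cases hc : a + s < b
  · have h2 : 0 ≤ (b - (a + s) + s - 1) / s := Int.ediv_nonneg (by omega) (by omega)
    rw [if_pos hab, if_pos hc, h1]
    rw [show ((b - (a + s) + s - 1) / s + 1).toNat = ((b - (a + s) + s - 1) / s).toNat + 1 by omega]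
    rw [List.range_succ_eq_map]
    simp only [List.map_cons, List.map_map]
    congr 1
    · norm_num
    · refine List.map_congr_left (fun k _ => ?_)
      simp only [Function.comp]
      push_cast
      ring
  · have h0 : (b - (a + s) + s - 1) / s = 0 :=
      Int.ediv_eq_zero_of_lt (by omega) (by omega)
    rw [if_pos hab, if_neg hc, h1, h0]
    simp

-- filter-style characterisation of one bucket of the scatter pass
def gatherF (mcd k : Int) : List Int → Int → List Int
  | [], _ => []
  | v :: rest, s => (if PySem.Int.mod s mcd = k then [v] else []) ++ gatherF mcd k rest (s + 1)

theorem scatter_length (mcd : Int) (l : List (Int × Int)) (bs : List (List Int)) :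
    (dividirScatter mcd l bs).length = bs.length := by
  induction l generalizing bs with
  | nil => rfl
  | cons p rest ih => obtain ⟨idx, val⟩ := p; simp [dividirScatter, ih]

theorem scatter_getD (mcd : Int) (hm : 0 < mcd) :
    ∀ (l : List Int) (s : Int) (bs : List (List Int)) (k : Nat),
      0 ≤ s → bs.length = mcd.toNat → k < mcd.toNat →
      (dividirScatter mcd (PySem.List.enumerate l s) bs).getD k [] =
        bs.getD k [] ++ gatherF mcd (k : Int) l s := by
  intro l
  induction l with
  | nil => intro s bs k _ _ _; simp [PySem.List.enumerate, dividirScatter, gatherF]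
  | cons v rest ih =>
    intro s bs k hs hlen hk
    have henum : PySem.List.enumerate (v :: rest) s = (s, v) :: PySem.List.enumerate rest (s + 1) := rfl
    have hmod : PySem.Int.mod s mcd = s % mcd := pvMod_pos s mcd hm
    have hm0 : 0 ≤ s % mcd := Int.emod_nonneg s (by omega)
    have hm1 : s % mcd < mcd := Int.emod_lt_of_pos s hm
    set t : Nat := (PySem.Int.mod s mcd).toNat with ht
    have htlen : t < bs.length := by omega
    rw [henum]
    show (dividirScatter mcd (PySem.List.enumerate rest (s + 1))
        (bs.set t (bs.getD t [] ++ [v]))).getD k [] = _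
    rw [ih (s + 1) _ k (by omega) (by simp [hlen]) hk]
    have hbs' : (bs.set t (bs.getD t [] ++ [v])).getD k [] =
        bs.getD k [] ++ (if PySem.Int.mod s mcd = (k : Int) then [v] else []) := by
      by_cases hek : t = k
      · have : PySem.Int.mod s mcd = (k : Int) := by omega
        rw [if_pos this, ← hek]
        simp [List.getD_eq_getElem?_getD, htlen]
      · have : ¬ PySem.Int.mod s mcd = (k : Int) := by omega
        rw [if_neg this]
        simp [List.getD_eq_getElem?_getD, hek]
    rw [hbs']
    show _ = bs.getD k [] ++ gatherF mcd (k : Int) (v :: rest) s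
    simp [gatherF, List.append_assoc]

theorem gatherF_eq_map (entrada : List Int) (mcd : Int) (hm : 0 < mcd)
    (k : Int) (hk0 : 0 ≤ k) (hk1 : k < mcd) :
    ∀ (l : List Int) (c : Nat), l = entrada.drop c →
      gatherF mcd k l (c : Int) =
        (PySem.List.pyRange ((c : Int) + (k - (c : Int)) % mcd) (entrada.length : Int) mcd).map
          (fun j => PySem.List.pyGetD entrada j 0) := by
  intro l
  induction l with
  | nil =>
    intro c hdrop
    have hcn : entrada.length ≤ c := by
      by_contra hlt
      have := congrArg List.length hdrop
      simp [List.length_drop] at this; omega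
    have hr : 0 ≤ (k - (c : Int)) % mcd := Int.emod_nonneg _ (by omega)
    rw [pvRange_pos_nil _ _ _ hm (by omega)]
    simp [gatherF]
  | cons v rest ih =>
    intro c hdrop
    have hcn : c < entrada.length := by
      by_contra hge
      rw [List.drop_eq_nil_of_le (by omega)] at hdrop
      exact List.cons_ne_nil _ _ hdrop
    have hsplit := List.drop_eq_getElem_cons hcn
    rw [hsplit] at hdrop
    obtain ⟨hv, hrest⟩ : entrada[c] = v ∧ rest = entrada.drop (c + 1) := by
      injection hdrop with h1 h2; exact ⟨h1.symm, h2⟩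
    have hmod : PySem.Int.mod (c : Int) mcd = (c : Int) % mcd := pvMod_pos _ _ hm
    by_cases hcase : PySem.Int.mod (c : Int) mcd = k
    · -- this index lands in bucket k
      have hck : (c : Int) % mcd = k := by rw [← hmod]; exact hcase
      have hdvd : mcd ∣ k - (c : Int) := by
        refine ⟨-((c : Int) / mcd), ?_⟩
        have h := Int.emod_add_mul_ediv (c : Int) mcd
        rw [mul_neg]
        omega
      have h0 : (k - (c : Int)) % mcd = 0 :=
        pvEmod_unique _ _ _ hm le_rfl hm (by simpa using hdvd)
      have h1' : (k - ((c : Int) + 1)) % mcd = mcd - 1 := by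
        apply pvEmod_unique _ _ _ hm (by omega) (by omega)
        obtain ⟨q, hq⟩ := hdvd
        exact ⟨q - 1, by rw [mul_sub, mul_one]; omega⟩
      rw [pvRange_pos_cons _ _ _ hm (by rw [h0]; omega)]
      simp only [gatherF, if_pos hcase, List.map_cons]
      have hget : PySem.List.pyGetD entrada ((c : Int) + (k - (c : Int)) % mcd) 0 = v := by
        rw [h0, add_zero, PySem.List.pyGetD_eq_getElem entrada 0 (by omega) (by omega)]
        simpa using hv
      rw [hget]
      have := ih (c + 1) hrest
      rw [hrest] at this ⊢
      push_cast at this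
      rw [this, h0, h1']
      rw [show (c : Int) + 1 + (mcd - 1) = (c : Int) + 0 + mcd from by ring]
      rfl
    · -- this index lands in another bucket
      have hck : (c : Int) % mcd ≠ k := by rw [← hmod]; exact hcase
      set r := (k - (c : Int)) % mcd with hr
      have hr0 : 0 ≤ r := Int.emod_nonneg _ (by omega)
      have hr1 : r < mcd := Int.emod_lt_of_pos _ hm
      have hrne : r ≠ 0 := by
        intro h0
        have hdvd : mcd ∣ k - (c : Int) := Int.dvd_of_emod_eq_zero (by rw [← hr]; exact h0)
        have : k % mcd = (c : Int) % mcd := by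
          rw [Int.emod_eq_emod_iff_emod_sub_eq_zero]
          exact Int.emod_eq_zero_of_dvd hdvd
        rw [Int.emod_eq_of_lt hk0 hk1] at this
        exact hck this.symm
      have hdvdr : mcd ∣ (k - (c : Int)) - r := by
        refine ⟨(k - (c : Int)) / mcd, ?_⟩
        have h := Int.emod_add_mul_ediv (k - (c : Int)) mcd
        omega
      have h1' : (k - ((c : Int) + 1)) % mcd = r - 1 := by
        apply pvEmod_unique _ _ _ hm (by omega) (by omega)
        obtain ⟨q, hq⟩ := hdvdr
        exact ⟨q, by omega⟩
      simp only [gatherF, if_neg hcase, List.nil_append]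
      have := ih (c + 1) hrest
      rw [hrest] at this ⊢
      push_cast at this
      rw [this, h1', show (c : Int) + 1 + (r - 1) = (c : Int) + r from by ring]

-- ===== VERDICT (by name: the statement is the Claim_ definition above) =====
theorem dividir_spec : Claim_equal_dividir := by
  intro entrada mcd _
  unfold Spec_dividir dividir dividir_alt
  by_cases hm : 0 < mcd
  · rw [if_pos hm]
    rw [PySem.List.foldl_append_singleton_eq_map
      (fun i => (PySem.List.pyRange i (entrada.length : Int) mcd).foldl
        (fun auxiliar j => auxiliar ++ [PySem.List.pyGetD entrada j 0]) [])]
    simp only [List.nil_append]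
    apply List.ext_getElem
    · rw [List.length_map, PySem.List.length_pyRange_one, scatter_length, List.length_replicate]
      omega
    · intro k hk1 hk2
      have hkm : k < mcd.toNat := by
        rw [scatter_length, List.length_replicate] at hk2; exact hk2
      have hlenrep : (List.replicate mcd.toNat ([] : List Int)).length = mcd.toNat := by simp
      rw [List.getElem_map, PySem.List.getElem_pyRange_one, zero_add]
      rw [PySem.List.foldl_append_singleton_eq_map (fun j => PySem.List.pyGetD entrada j 0)]
      simp only [List.nil_append]
      rw [← List.getD_eq_getElem _ [] hk2]
      rw [scatter_getD mcd hm entrada 0 _ k le_rfl hlenrep hkm]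
      have hrep : (List.replicate mcd.toNat ([] : List Int)).getD k [] = [] := by
        simp [List.getD_eq_getElem?_getD, hkm]
      rw [hrep, List.nil_append]
      have h0 := gatherF_eq_map entrada mcd hm (k : Int) (by omega) (by omega) entrada 0 (by simp)
      rw [show ((0 : Nat) : Int) = 0 by rfl] at h0
      rw [h0]
      congr 1
      rw [sub_zero, Int.emod_eq_of_lt (by omega) (by omega)]
      ring
  · rw [if_neg hm]
    rw [PySem.List.pyRange_one_eq_nil (by omega)]
    rw [show mcd.toNat = 0 by omega]
    rfl
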